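-- pv_equiv track=rewrite | github.com/dbeneat/AOC2024 | day21.py | nbKeypresses
-- ===== SOURCE A (Python) =====
-- dk={'^':(1,0),'A':(2,0),'<':(0,1),'v':(1,1),'>':(2,1),'X':(0,0)}
--
-- def allPaths(A,B,pad):
--     M=[]
--     def F(A,B,L,pad):
--         if A==B:
--             M.extend(L)
--             return M
--         x1,y1=A
--         x2,y2=B
--         if x2>x1 and pad["X"]!=(x1+1,y1):
--             F((x1+1,y1),B,[x+">" for x in L],pad)
--         if x2<x1 and pad["X"]!=(x1-1,y1):
--             F((x1-1,y1),B,[x+"<" for x in L],pad)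
--         if y2>y1 and pad["X"]!=(x1,y1+1):
--             F((x1,y1+1),B,[x+"v" for x in L],pad)
--         if y2<y1 and pad["X"]!=(x1,y1-1):
--             F((x1,y1-1),B,[x+"^" for x in L],pad)
--         return M
--     return [x+"A" for x in F(A,B,[""],pad)]
--
-- memo={}
--
-- def nbKeypresses(code,depth):
--     if depth==0: return len(code)
--     h=(code,depth)
--     if h in memo:
--         return memo[h]
--     s=0
--     code="A"+code
--     for i in range(len(code)-1):
--         s+=min(nbKeypresses(path,depth-1) for path in allPaths(dk[code[i]],dk[code[i+1]],dk))
--     memo[h]=s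
--     return s
-- ===== SOURCE B (Python) =====
-- dk={'^':(1,0),'A':(2,0),'<':(0,1),'v':(1,1),'>':(2,1),'X':(0,0)}
--
-- def allPaths(A,B,pad):
--     M=[]
--     def F(A,B,L,pad):
--         if A==B:
--             M.extend(L)
--             return M
--         x1,y1=A
--         x2,y2=B
--         if x2>x1 and pad["X"]!=(x1+1,y1):
--             F((x1+1,y1),B,[x+">" for x in L],pad)
--         if x2<x1 and pad["X"]!=(x1-1,y1):
--             F((x1-1,y1),B,[x+"<" for x in L],pad)
--         if y2>y1 and pad["X"]!=(x1,y1+1):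
--             F((x1,y1+1),B,[x+"v" for x in L],pad)
--         if y2<y1 and pad["X"]!=(x1,y1-1):
--             F((x1,y1-1),B,[x+"^" for x in L],pad)
--         return M
--     return [x+"A" for x in F(A,B,[""],pad)]
--
-- KEYS="^A<v>"
--
-- def nbKeypresses(code,depth):
--     if depth==0:
--         return len(code)
--     if not code:
--         return 0
--     # bottom-up: cost[(a,b)] = presses on the human keypad to move a deeper robot one key; iterate depth-1 times
--     cost={(a,b): min(len(p) for p in allPaths(dk[a],dk[b],dk)) for a in KEYS for b in KEYS}
--     for _ in range(depth-1):
--         cost={(a,b): min(sum(cost[(u,w)] for u,w in zip("A"+p,p)) for p in allPaths(dk[a],dk[b],dk)) for a in KEYS for b in KEYS}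
--     return sum(cost[(u,w)] for u,w in zip("A"+code,code))
-- ===== Notes on version B (the rewrite author's own statement) =====
-- stated objective: alternative
-- what changed: A's memoised top-down recursion over concrete path strings is replaced by a bottom-up dynamic program: a 5x5 table of per-key-pair costs is iterated depth-1 times and the answer is a single sum of table entries over the code's adjacent pairs.
import Mathlib
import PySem

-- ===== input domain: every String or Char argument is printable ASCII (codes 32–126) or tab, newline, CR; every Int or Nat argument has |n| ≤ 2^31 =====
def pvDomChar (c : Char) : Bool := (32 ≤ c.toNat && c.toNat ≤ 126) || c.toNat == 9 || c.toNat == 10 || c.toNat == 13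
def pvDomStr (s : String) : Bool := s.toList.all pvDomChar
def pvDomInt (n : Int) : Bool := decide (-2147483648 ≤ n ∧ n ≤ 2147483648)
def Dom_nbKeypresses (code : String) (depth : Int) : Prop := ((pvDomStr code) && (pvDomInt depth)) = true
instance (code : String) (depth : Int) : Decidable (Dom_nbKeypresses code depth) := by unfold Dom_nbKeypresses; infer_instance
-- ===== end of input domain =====

-- B replaces A's memoised top-down recursion over path strings by a bottom-up dynamic-programming
-- table of per-key-pair costs iterated depth times (objective: alternative decomposition, same cost).

-- ===== PORT A =====
-- Shared helper: Python's allPaths (Source B contains the identical helper).  Strings are handled on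
-- their code-point lists per the PySem convention; the nested function F becomes apF with the
-- accumulator M explicit.  pad["X"] is ported as getD 'X' (0,0): every call site passes dk,
-- which contains "X", so the lookup never raises.
-- F recurses on the Manhattan distance to B, which each guarded step decreases by exactly one;
-- the explicit Nat argument (initialised to that distance in allPathsL) only totalises the
-- recursion structurally and is never exhausted before A = B.
def apF : Nat → PySem.Dict Char (Int × Int) → List (List Char) → Int × Int → Int × Int →
    List (List Char) → List (List Char)
  | 0, _, M, A, B, L => if A = B then M ++ L else M
  | n+1, pad, M, A, B, L =>
    if A = B then M ++ L
    else
      let gap := pad.getD 'X' (0,0)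
      let M1 := if B.1 > A.1 ∧ gap ≠ (A.1+1, A.2) then apF n pad M (A.1+1, A.2) B (L.map (· ++ ['>'])) else M
      let M2 := if B.1 < A.1 ∧ gap ≠ (A.1-1, A.2) then apF n pad M1 (A.1-1, A.2) B (L.map (· ++ ['<'])) else M1
      let M3 := if B.2 > A.2 ∧ gap ≠ (A.1, A.2+1) then apF n pad M2 (A.1, A.2+1) B (L.map (· ++ ['v'])) else M2
      let M4 := if B.2 < A.2 ∧ gap ≠ (A.1, A.2-1) then apF n pad M3 (A.1, A.2-1) B (L.map (· ++ ['^'])) else M3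
      M4

def allPathsL (A B : Int × Int) (pad : PySem.Dict Char (Int × Int)) : List (List Char) :=
  (apF ((B.1 - A.1).natAbs + (B.2 - A.2).natAbs) pad [] A B [[]]).map (· ++ ['A'])

-- the module constant dk (keys are the single characters iterated off Python strings)
def dkL : PySem.Dict Char (Int × Int) :=
  PySem.Dict.ofList [('^',(1,0)),('A',(2,0)),('<',(0,1)),('v',(1,1)),('>',(2,1)),('X',(0,0))]

-- A's recursion with the module-global cache `memo` threaded through explicitly (the cache is
-- value-transparent: nbKeypresses is pure, so starting each top-level call from the empty memo
-- returns the same values as Python's persistent global).  The fuel argument only totalises the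
-- recursion (Pre_ guarantees fuel ≥ depth; at fuel 0 with 0 < depth Python would be past its
-- recursion limit).  dk[c] is ported as getD c (0,0): Pre_ excludes the KeyError inputs, and
-- min(...) over an empty generator (ValueError, codes containing 'X') as .getD 0 likewise.
def nbGo : Nat → PySem.Dict (List Char × Int) Int → List Char → Int →
    Int × PySem.Dict (List Char × Int) Int
  | 0, memo, code, depth =>
    if depth = 0 then ((code.length : Int), memo)
    else
      match memo.get? (code, depth) with
      | some v => (v, memo)
      | none => (0, memo)
  | fuel' + 1, memo, code, depth =>
    if depth = 0 then ((code.length : Int), memo)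
    else
      match memo.get? (code, depth) with
      | some v => (v, memo)
      | none =>
        let code2 := 'A' :: code
        let r := (PySem.List.pyRange 0 ((code2.length : Int) - 1) 1).foldl
          (fun (acc : Int × PySem.Dict (List Char × Int) Int) i =>
            let a := (PySem.List.pyGet? code2 i).getD 'A'
            let b := (PySem.List.pyGet? code2 (i+1)).getD 'A'
            let vm := (allPathsL (dkL.getD a (0,0)) (dkL.getD b (0,0)) dkL).foldl
              (fun (vm : List Int × PySem.Dict (List Char × Int) Int) p =>
                ((vm.1 ++ [(nbGo fuel' vm.2 p (depth-1)).1]), (nbGo fuel' vm.2 p (depth-1)).2))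
              ([], acc.2)
            (acc.1 + (PySem.List.min? vm.1 (fun x => x)).getD 0, vm.2))
          (0, memo)
        (r.1, r.2.insert (code, depth) r.1)

def nbKeypresses (code : String) (depth : Int) : Int :=
  (nbGo depth.toNat PySem.Dict.empty code.toList depth).1

-- ===== PORT B =====
def keyChars : List Char := ['^', 'A', '<', 'v', '>']

def pairList : List (Char × Char) :=
  keyChars.flatMap (fun a => keyChars.map (fun b => (a, b)))

-- the dict comprehension {(a,b): f(a,b) for a in KEYS for b in KEYS}
def mkCost (f : Char × Char → Int) : PySem.Dict (Char × Char) Int :=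
  pairList.foldl (fun d ab => d.insert ab (f ab)) PySem.Dict.empty

-- sum(cost[(u,w)] for u,w in zip("A"+p, p)); all looked-up pairs are present, so getD 0 is exact
def pathCost (cost : PySem.Dict (Char × Char) Int) (p : List Char) : Int :=
  ((('A' :: p).zip p).map (fun uw => cost.getD uw 0)).sum

def costInit : PySem.Dict (Char × Char) Int :=
  mkCost (fun ab =>
    (PySem.List.min? ((allPathsL (dkL.getD ab.1 (0,0)) (dkL.getD ab.2 (0,0)) dkL).map
      (fun p => (p.length : Int))) (fun x => x)).getD 0)

def costStep (cost : PySem.Dict (Char × Char) Int) : PySem.Dict (Char × Char) Int :=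
  mkCost (fun ab =>
    (PySem.List.min? ((allPathsL (dkL.getD ab.1 (0,0)) (dkL.getD ab.2 (0,0)) dkL).map
      (pathCost cost)) (fun x => x)).getD 0)

def nbKeypresses_alt (code : String) (depth : Int) : Int :=
  if depth = 0 then (code.toList.length : Int)
  else if code.toList.isEmpty then 0
  else
    pathCost ((PySem.List.pyRange 0 (depth - 1) 1).foldl (fun c _ => costStep c) costInit)
      code.toList

-- ===== PRECONDITION & SPEC =====
-- Pre_ excludes exactly the inputs on which Python A raises: characters outside dk's keys
-- (KeyError), codes containing 'X' (no path into the gap: min() over an empty generator,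
-- ValueError), negative depth with a nonempty code (unbounded recursion, RecursionError), and
-- depth > 300 with a nonempty code (Python's recursion limit: A raises RecursionError at depth
-- ≳ 335; 300 is a safe measured bound).  depth = 0 (any code) and code = "" (any depth) return.
def Pre_nbKeypresses (code : String) (depth : Int) : Prop :=
  depth = 0 ∨ code = "" ∨
    (1 ≤ depth ∧ depth ≤ 300 ∧ code.toList.all (fun c => c ∈ keyChars) = true)
instance (code : String) (depth : Int) : Decidable (Pre_nbKeypresses code depth) := by
  unfold Pre_nbKeypresses; infer_instance

def pvWitness_nbKeypresses : String × Int := ("<A", 3)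

def Spec_nbKeypresses (code : String) (depth : Int) (out : Int) : Prop := out = nbKeypresses_alt code depth
instance (code : String) (depth : Int) (out : Int) : Decidable (Spec_nbKeypresses code depth out) := by unfold Spec_nbKeypresses; infer_instance

-- ===== CLAIM (what is proved, stated in full; the proofs are below) =====
def Claim_equal_nbKeypresses : Prop := ∀ (code : String) (depth : Int), Dom_nbKeypresses code depth → Pre_nbKeypresses code depth → Spec_nbKeypresses code depth (nbKeypresses code depth)

-- ===== LEMMAS AND PROOFS =====

-- reference value: A's recursion without the memo (the common semantics both ports are related to)
def N : Nat → List Char → Int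
  | 0, code => (code.length : Int)
  | d+1, code =>
      (PySem.List.pyRange 0 ((('A'::code).length : Int) - 1) 1).foldl
        (fun s i =>
          s + (PySem.List.min?
            ((allPathsL (dkL.getD ((PySem.List.pyGet? ('A'::code) i).getD 'A') (0,0))
                        (dkL.getD ((PySem.List.pyGet? ('A'::code) (i+1)).getD 'A') (0,0)) dkL).map (N d))
            (fun x => x)).getD 0)
        0

def minPath (d : Nat) (a b : Char) : Int :=
  (PySem.List.min? ((allPathsL (dkL.getD a (0,0)) (dkL.getD b (0,0)) dkL).map (N d))
    (fun x => x)).getD 0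

def MemoOK (m : PySem.Dict (List Char × Int) Int) : Prop :=
  ∀ k v, m.get? k = some v → v = N k.2.toNat k.1

def costAt : Nat → PySem.Dict (Char × Char) Int
  | 0 => costInit
  | t+1 => costStep (costAt t)

-- every character of every path produced by allPaths on dk is one of the five key characters
lemma apF_chars (n : Nat) : ∀ (pad : PySem.Dict Char (Int × Int)) (M : List (List Char))
    (A B : Int × Int) (L : List (List Char)),
    (∀ s ∈ M, ∀ c ∈ s, c ∈ keyChars) → (∀ s ∈ L, ∀ c ∈ s, c ∈ keyChars) →
    ∀ s ∈ apF n pad M A B L, ∀ c ∈ s, c ∈ keyChars := by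
  induction n with
  | zero =>
    intro pad M A B L hM hL
    rw [apF]
    by_cases hAB : A = B
    · rw [if_pos hAB]
      intro s hs
      rcases List.mem_append.1 hs with h | h
      · exact hM s h
      · exact hL s h
    · rw [if_neg hAB]
      exact hM
  | succ n IH =>
    intro pad M A B L hM hL
    by_cases hAB : A = B
    · rw [apF, if_pos hAB]
      intro s hs
      rcases List.mem_append.1 hs with h | h
      · exact hM s h
      · exact hL s h
    · rw [apF, if_neg hAB]
      have hmap : ∀ (ch : Char), ch ∈ keyChars → ∀ s ∈ L.map (· ++ [ch]), ∀ c ∈ s, c ∈ keyChars := by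
        intro ch hch s hs c hc
        obtain ⟨t, ht, rfl⟩ := List.mem_map.1 hs
        rcases List.mem_append.1 hc with h | h
        · exact hL t ht c h
        · rw [List.mem_singleton.1 h]; exact hch
      have key : ∀ (c : Prop) [Decidable c] (Mp : List (List Char)) (A' : Int × Int)
          (L' : List (List Char)),
          (∀ s ∈ Mp, ∀ ch ∈ s, ch ∈ keyChars) → (∀ s ∈ L', ∀ ch ∈ s, ch ∈ keyChars) →
          ∀ s ∈ (if c then apF n pad Mp A' B L' else Mp), ∀ ch ∈ s, ch ∈ keyChars := by
        intro c _ Mp A' L' hMp hL' s hs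
        by_cases hc : c
        · rw [if_pos hc] at hs
          exact IH pad Mp A' B L' hMp hL' s hs
        · rw [if_neg hc] at hs
          exact hMp s hs
      apply key
      · apply key
        · apply key
          · apply key
            · exact hM
            · exact hmap '>' (by decide)
          · exact hmap '<' (by decide)
        · exact hmap 'v' (by decide)
      · exact hmap '^' (by decide)

lemma allPaths_chars (A B : Int × Int) :
    ∀ p ∈ allPathsL A B dkL, ∀ c ∈ p, c ∈ keyChars := by
  intro p hp c hc
  obtain ⟨q, hq, rfl⟩ := List.mem_map.1 hp
  rcases List.mem_append.1 hc with h | h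
  · refine apF_chars ((B.1 - A.1).natAbs + (B.2 - A.2).natAbs) dkL [] A B [[]]
      (by intro s hs; simp at hs) ?_ q hq c h
    intro s hs ch hch
    rw [List.mem_singleton.1 hs] at hch
    simp at hch
  · rw [List.mem_singleton.1 h]; decide

lemma mem_pairList (ab : Char × Char) : ab ∈ pairList ↔ ab.1 ∈ keyChars ∧ ab.2 ∈ keyChars := by
  obtain ⟨a, b⟩ := ab
  simp only [pairList, List.mem_flatMap, List.mem_map, Prod.mk.injEq]
  constructor
  · rintro ⟨x, hx, y, hy, rfl, rfl⟩; exact ⟨hx, hy⟩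
  · rintro ⟨h1, h2⟩; exact ⟨a, h1, b, h2, rfl, rfl⟩

-- the N-recursion, re-expressed as a sum over the adjacent pairs of 'A'::cs
lemma N_succ_pairs (d : Nat) (cs : List Char) :
    N (d+1) cs = ((('A'::cs).zip cs).map (fun uw => minPath d uw.1 uw.2)).sum := by
  conv_lhs => rw [N]
  rw [PySem.List.foldl_add, zero_add]
  have hlen : ((('A'::cs).length : Int) - 1) = ((cs.length : Nat) : Int) := by
    simp
  rw [hlen, PySem.List.pyRange_zero_nat, List.map_map]
  congr 1
  apply List.ext_getElem
  · simp
  · intro i h1 h2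
    have hi : i < cs.length := by simpa using h1
    simp only [List.getElem_map, List.getElem_range, Function.comp_apply, List.getElem_zip]
    have e1 : PySem.List.pyGet? ('A'::cs) ((i : Nat) : Int) = some (('A'::cs)[i]) := by
      rw [PySem.List.pyGet?_natCast, List.getElem?_eq_getElem (by simp; omega)]
    have e2 : PySem.List.pyGet? ('A'::cs) (((i : Nat) : Int) + 1) = some (('A'::cs)[i+1]) := by
      have : (((i : Nat) : Int) + 1) = (((i+1 : Nat) : Nat) : Int) := by push_cast; ring
      rw [this, PySem.List.pyGet?_natCast, List.getElem?_eq_getElem (by simp; omega)]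
    rw [e1, e2]
    simp [minPath, List.getElem_cons_succ]

lemma mkCost_getD (f : Char × Char → Int) (ab : Char × Char) (h : ab ∈ pairList) :
    (mkCost f).getD ab 0 = f ab := by
  have hitems := PySem.Dict.items_foldl_insert_fresh pairList (fun ab => ab) f PySem.Dict.empty
    (by intro a _; exact PySem.Dict.contains_empty a)
    (by rw [List.map_id']; decide)
  have hmk : (mkCost f).items = pairList.map (fun ab => (ab, f ab)) := by
    rw [mkCost, hitems]
    simp [PySem.Dict.empty]
  have hnd : (mkCost f).keys.Nodup := by
    rw [mkCost]
    exact PySem.Dict.nodup_keys_foldl_insert pairList (fun _ ab => f ab) PySem.Dict.empty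
      (by simp [PySem.Dict.empty, PySem.Dict.keys])
  refine PySem.Dict.getD_of_mem_items (mkCost f) ?_ hnd 0
  rw [hmk]
  exact List.mem_map_of_mem h

lemma pathCost_eq (cost : PySem.Dict (Char × Char) Int) (t : Nat) (p : List Char)
    (hp : ∀ c ∈ p, c ∈ keyChars)
    (hc : ∀ ab ∈ pairList, cost.getD ab 0 = minPath t ab.1 ab.2) :
    pathCost cost p = N (t+1) p := by
  rw [pathCost, N_succ_pairs]
  congr 1
  apply List.map_congr_left
  intro uw huw
  obtain ⟨u, w⟩ := uw
  obtain ⟨h1, h2⟩ := List.of_mem_zip huw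
  apply hc
  rw [mem_pairList]
  refine ⟨?_, hp _ h2⟩
  rcases List.mem_cons.1 h1 with h | h
  · rw [h]; exact (by decide : ('A' : Char) ∈ keyChars)
  · exact hp _ h

lemma costAt_getD (t : Nat) : ∀ ab ∈ pairList, (costAt t).getD ab 0 = minPath t ab.1 ab.2 := by
  induction t with
  | zero =>
    intro ab hab
    show costInit.getD ab 0 = _
    rw [costInit, mkCost_getD _ _ hab, minPath]
    congr 2
  | succ t IH =>
    intro ab hab
    show (costStep (costAt t)).getD ab 0 = _
    rw [costStep, mkCost_getD _ _ hab, minPath]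
    congr 2
    apply List.map_congr_left
    intro p hp
    exact pathCost_eq (costAt t) t p (allPaths_chars _ _ p hp) IH

lemma costFold (n : Nat) :
    (PySem.List.pyRange 0 (n : Int) 1).foldl (fun c _ => costStep c) costInit = costAt n := by
  induction n with
  | zero =>
    rw [show ((0 : Nat) : Int) = 0 by norm_num, PySem.List.pyRange_one_eq_nil le_rfl]
    rfl
  | succ k ih =>
    rw [show ((k+1 : Nat) : Int) = (k : Int) + 1 by push_cast; ring,
      PySem.List.pyRange_one_succ_right (by exact_mod_cast k.zero_le), List.foldl_append]
    simp only [List.foldl_cons, List.foldl_nil, ih]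
    rfl

lemma alt_eq_N (code : String) (depth : Int) (h1 : 1 ≤ depth)
    (hne : code.toList ≠ []) (hk : ∀ c ∈ code.toList, c ∈ keyChars) :
    nbKeypresses_alt code depth = N depth.toNat code.toList := by
  rw [nbKeypresses_alt, if_neg (by omega : ¬ depth = 0),
    if_neg (by simpa [List.isEmpty_iff] using hne)]
  rw [show depth - 1 = (((depth - 1).toNat : Nat) : Int) by omega, costFold]
  rw [pathCost_eq _ ((depth - 1).toNat) _ hk (costAt_getD _)]
  congr 1
  omega

lemma paths_fold (fu : Nat) (dep : Int) (d : Nat)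
    (IH : ∀ memo code, MemoOK memo →
      (nbGo fu memo code dep).1 = N d code ∧ MemoOK (nbGo fu memo code dep).2) :
    ∀ (paths : List (List Char)) (acc : List Int) (memo : PySem.Dict (List Char × Int) Int),
      MemoOK memo →
      ((paths.foldl (fun vm p => ((vm.1 ++ [(nbGo fu vm.2 p dep).1]), (nbGo fu vm.2 p dep).2))
          (acc, memo)).1 = acc ++ paths.map (N d))
      ∧ MemoOK ((paths.foldl (fun vm p => ((vm.1 ++ [(nbGo fu vm.2 p dep).1]), (nbGo fu vm.2 p dep).2))
          (acc, memo)).2) := by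
  intro paths
  induction paths with
  | nil => intro acc memo hm; exact ⟨by simp, hm⟩
  | cons p ps ihp =>
    intro acc memo hm
    obtain ⟨h1, h2⟩ := IH memo p hm
    obtain ⟨g1, g2⟩ := ihp (acc ++ [(nbGo fu memo p dep).1]) (nbGo fu memo p dep).2 h2
    constructor
    · exact g1.trans (by rw [h1]; simp)
    · exact g2

lemma range_fold (fu : Nat) (dep : Int) (d : Nat) (code2 : List Char)
    (IH : ∀ memo code, MemoOK memo →
      (nbGo fu memo code dep).1 = N d code ∧ MemoOK (nbGo fu memo code dep).2) :
    ∀ (is : List Int) (s0 : Int) (memo : PySem.Dict (List Char × Int) Int), MemoOK memo →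
      ((is.foldl (fun (acc : Int × PySem.Dict (List Char × Int) Int) i =>
          ((acc.1 + (PySem.List.min?
              ((allPathsL (dkL.getD ((PySem.List.pyGet? code2 i).getD 'A') (0,0))
                (dkL.getD ((PySem.List.pyGet? code2 (i+1)).getD 'A') (0,0)) dkL).foldl
                (fun vm p => ((vm.1 ++ [(nbGo fu vm.2 p dep).1]), (nbGo fu vm.2 p dep).2))
                ([], acc.2)).1 (fun x => x)).getD 0),
            ((allPathsL (dkL.getD ((PySem.List.pyGet? code2 i).getD 'A') (0,0))
                (dkL.getD ((PySem.List.pyGet? code2 (i+1)).getD 'A') (0,0)) dkL).foldl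
                (fun vm p => ((vm.1 ++ [(nbGo fu vm.2 p dep).1]), (nbGo fu vm.2 p dep).2))
                ([], acc.2)).2)) (s0, memo)).1
        = is.foldl (fun s i => s + (PySem.List.min?
              ((allPathsL (dkL.getD ((PySem.List.pyGet? code2 i).getD 'A') (0,0))
                (dkL.getD ((PySem.List.pyGet? code2 (i+1)).getD 'A') (0,0)) dkL).map (N d))
              (fun x => x)).getD 0) s0)
      ∧ MemoOK ((is.foldl (fun (acc : Int × PySem.Dict (List Char × Int) Int) i =>
          ((acc.1 + (PySem.List.min?
              ((allPathsL (dkL.getD ((PySem.List.pyGet? code2 i).getD 'A') (0,0))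
                (dkL.getD ((PySem.List.pyGet? code2 (i+1)).getD 'A') (0,0)) dkL).foldl
                (fun vm p => ((vm.1 ++ [(nbGo fu vm.2 p dep).1]), (nbGo fu vm.2 p dep).2))
                ([], acc.2)).1 (fun x => x)).getD 0),
            ((allPathsL (dkL.getD ((PySem.List.pyGet? code2 i).getD 'A') (0,0))
                (dkL.getD ((PySem.List.pyGet? code2 (i+1)).getD 'A') (0,0)) dkL).foldl
                (fun vm p => ((vm.1 ++ [(nbGo fu vm.2 p dep).1]), (nbGo fu vm.2 p dep).2))
                ([], acc.2)).2)) (s0, memo)).2) := by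
  intro is
  induction is with
  | nil => intro s0 memo hm; exact ⟨rfl, hm⟩
  | cons i is ihi =>
    intro s0 memo hm
    obtain ⟨p1, p2⟩ := paths_fold fu dep d IH
      (allPathsL (dkL.getD ((PySem.List.pyGet? code2 i).getD 'A') (0,0))
        (dkL.getD ((PySem.List.pyGet? code2 (i+1)).getD 'A') (0,0)) dkL) [] memo hm
    obtain ⟨g1, g2⟩ := ihi
      (s0 + (PySem.List.min?
        ((allPathsL (dkL.getD ((PySem.List.pyGet? code2 i).getD 'A') (0,0))
          (dkL.getD ((PySem.List.pyGet? code2 (i+1)).getD 'A') (0,0)) dkL).foldl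
          (fun vm p => ((vm.1 ++ [(nbGo fu vm.2 p dep).1]), (nbGo fu vm.2 p dep).2))
          ([], memo)).1 (fun x => x)).getD 0)
      ((allPathsL (dkL.getD ((PySem.List.pyGet? code2 i).getD 'A') (0,0))
          (dkL.getD ((PySem.List.pyGet? code2 (i+1)).getD 'A') (0,0)) dkL).foldl
          (fun vm p => ((vm.1 ++ [(nbGo fu vm.2 p dep).1]), (nbGo fu vm.2 p dep).2))
          ([], memo)).2 p2
    constructor
    · refine Eq.trans (by exact g1) ?_
      have e : ((allPathsL (dkL.getD ((PySem.List.pyGet? code2 i).getD 'A') (0,0))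
          (dkL.getD ((PySem.List.pyGet? code2 (i+1)).getD 'A') (0,0)) dkL).foldl
          (fun vm p => ((vm.1 ++ [(nbGo fu vm.2 p dep).1]), (nbGo fu vm.2 p dep).2))
          ([], memo)).1
          = (allPathsL (dkL.getD ((PySem.List.pyGet? code2 i).getD 'A') (0,0))
              (dkL.getD ((PySem.List.pyGet? code2 (i+1)).getD 'A') (0,0)) dkL).map (N d) := by
        rw [p1]; simp
      rw [e, List.foldl_cons]
    · exact g2

lemma nbGo_spec (fuel : Nat) : ∀ (memo : PySem.Dict (List Char × Int) Int) (code : List Char)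
    (depth : Int), MemoOK memo → 0 ≤ depth → depth ≤ (fuel : Int) →
    (nbGo fuel memo code depth).1 = N depth.toNat code ∧ MemoOK (nbGo fuel memo code depth).2 := by
  induction fuel with
  | zero =>
    intro memo code depth hm h0 hf
    have hd : depth = 0 := by omega
    subst hd
    exact ⟨by simp [nbGo, N], by simpa [nbGo] using hm⟩
  | succ n IHn =>
    intro memo code depth hm h0 hf
    by_cases hd : depth = 0
    · subst hd
      exact ⟨by simp [nbGo, N], by simpa [nbGo] using hm⟩
    · rcases hget : memo.get? (code, depth) with _ | v
      · -- cache miss: the recursive case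
        have IH : ∀ memo' code', MemoOK memo' →
            (nbGo n memo' code' (depth-1)).1 = N (depth-1).toNat code'
            ∧ MemoOK (nbGo n memo' code' (depth-1)).2 := by
          intro memo' code' hm'
          exact IHn memo' code' (depth-1) hm' (by omega) (by omega)
        have heq : nbGo (n+1) memo code depth =
            (((PySem.List.pyRange 0 ((('A'::code).length : Int) - 1) 1).foldl
              (fun (acc : Int × PySem.Dict (List Char × Int) Int) i =>
                ((acc.1 + (PySem.List.min?
                    ((allPathsL (dkL.getD ((PySem.List.pyGet? ('A'::code) i).getD 'A') (0,0))
                      (dkL.getD ((PySem.List.pyGet? ('A'::code) (i+1)).getD 'A') (0,0)) dkL).foldl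
                      (fun vm p => ((vm.1 ++ [(nbGo n vm.2 p (depth-1)).1]), (nbGo n vm.2 p (depth-1)).2))
                      ([], acc.2)).1 (fun x => x)).getD 0),
                  ((allPathsL (dkL.getD ((PySem.List.pyGet? ('A'::code) i).getD 'A') (0,0))
                      (dkL.getD ((PySem.List.pyGet? ('A'::code) (i+1)).getD 'A') (0,0)) dkL).foldl
                      (fun vm p => ((vm.1 ++ [(nbGo n vm.2 p (depth-1)).1]), (nbGo n vm.2 p (depth-1)).2))
                      ([], acc.2)).2)) (0, memo)).1,
             ((PySem.List.pyRange 0 ((('A'::code).length : Int) - 1) 1).foldl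
              (fun (acc : Int × PySem.Dict (List Char × Int) Int) i =>
                ((acc.1 + (PySem.List.min?
                    ((allPathsL (dkL.getD ((PySem.List.pyGet? ('A'::code) i).getD 'A') (0,0))
                      (dkL.getD ((PySem.List.pyGet? ('A'::code) (i+1)).getD 'A') (0,0)) dkL).foldl
                      (fun vm p => ((vm.1 ++ [(nbGo n vm.2 p (depth-1)).1]), (nbGo n vm.2 p (depth-1)).2))
                      ([], acc.2)).1 (fun x => x)).getD 0),
                  ((allPathsL (dkL.getD ((PySem.List.pyGet? ('A'::code) i).getD 'A') (0,0))
                      (dkL.getD ((PySem.List.pyGet? ('A'::code) (i+1)).getD 'A') (0,0)) dkL).foldl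
                      (fun vm p => ((vm.1 ++ [(nbGo n vm.2 p (depth-1)).1]), (nbGo n vm.2 p (depth-1)).2))
                      ([], acc.2)).2)) (0, memo)).2.insert (code, depth)
             ((PySem.List.pyRange 0 ((('A'::code).length : Int) - 1) 1).foldl
              (fun (acc : Int × PySem.Dict (List Char × Int) Int) i =>
                ((acc.1 + (PySem.List.min?
                    ((allPathsL (dkL.getD ((PySem.List.pyGet? ('A'::code) i).getD 'A') (0,0))
                      (dkL.getD ((PySem.List.pyGet? ('A'::code) (i+1)).getD 'A') (0,0)) dkL).foldl
                      (fun vm p => ((vm.1 ++ [(nbGo n vm.2 p (depth-1)).1]), (nbGo n vm.2 p (depth-1)).2))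
                      ([], acc.2)).1 (fun x => x)).getD 0),
                  ((allPathsL (dkL.getD ((PySem.List.pyGet? ('A'::code) i).getD 'A') (0,0))
                      (dkL.getD ((PySem.List.pyGet? ('A'::code) (i+1)).getD 'A') (0,0)) dkL).foldl
                      (fun vm p => ((vm.1 ++ [(nbGo n vm.2 p (depth-1)).1]), (nbGo n vm.2 p (depth-1)).2))
                      ([], acc.2)).2)) (0, memo)).1) := by
          simp only [nbGo]
          rw [if_neg hd, hget]
        obtain ⟨r1, r2⟩ := range_fold n (depth-1) (depth-1).toNat ('A'::code) IH
          (PySem.List.pyRange 0 ((('A'::code).length : Int) - 1) 1) 0 memo hm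
        have hN : (PySem.List.pyRange 0 ((('A'::code).length : Int) - 1) 1).foldl
            (fun s i => s + (PySem.List.min?
              ((allPathsL (dkL.getD ((PySem.List.pyGet? ('A'::code) i).getD 'A') (0,0))
                (dkL.getD ((PySem.List.pyGet? ('A'::code) (i+1)).getD 'A') (0,0)) dkL).map
                (N (depth-1).toNat))
              (fun x => x)).getD 0) 0 = N depth.toNat code := by
          rw [show depth.toNat = (depth-1).toNat + 1 by omega]
          conv_rhs => rw [N]
        rw [heq]
        refine ⟨by rw [r1, hN], ?_⟩
        intro k v hkv
        rw [PySem.Dict.get?_insert] at hkv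
        by_cases hk : k = (code, depth)
        · rw [if_pos hk] at hkv
          subst hk
          cases hkv
          rw [r1, hN]
        · rw [if_neg hk] at hkv
          exact r2 k v hkv
      · -- cache hit
        have hv := hm (code, depth) v hget
        have heq : nbGo (n+1) memo code depth = (v, memo) := by
          simp only [nbGo]
          rw [if_neg hd, hget]
        rw [heq]
        exact ⟨hv, hm⟩

lemma nbGo_nil (fuel : Nat) (depth : Int) (hd : ¬ depth = 0) :
    (nbGo fuel PySem.Dict.empty ([] : List Char) depth).1 = 0 := by
  cases fuel with
  | zero => simp [nbGo, hd]
  | succ n =>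
    have heq : (PySem.Dict.empty : PySem.Dict (List Char × Int) Int).get? (([] : List Char), depth) = none :=
      PySem.Dict.get?_empty _
    simp only [nbGo]
    rw [if_neg hd, heq]
    have : (((('A' : Char)::([] : List Char)).length : Int) - 1) = 0 := by simp
    rw [this, PySem.List.pyRange_one_eq_nil le_rfl]
    rfl

-- ===== VERDICT (by name: the statement is the Claim_ definition above) =====
theorem nbKeypresses_spec : Claim_equal_nbKeypresses := by
  intro code depth hdom hpre
  unfold Spec_nbKeypresses
  rcases hpre with hd | hc | ⟨h1, h2, hk⟩
  · subst hd
    simp [nbKeypresses, nbKeypresses_alt, nbGo]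
  · subst hc
    by_cases hd : depth = 0
    · subst hd
      simp [nbKeypresses, nbKeypresses_alt, nbGo]
    · rw [nbKeypresses_alt, if_neg hd, if_pos (by decide)]
      rw [nbKeypresses]
      exact nbGo_nil depth.toNat depth hd
  · have hne : code.toList ≠ [] ∨ code = "" := by
      by_cases h : code.toList = []
      · right
        have := congrArg String.ofList h
        simpa [String.ofList_toList] using this
      · left; exact h
    rcases hne with hne | rfl
    · have hk' : ∀ c ∈ code.toList, c ∈ keyChars := by
        intro c hc
        have := List.all_eq_true.1 hk c hc
        simpa using this
      rw [alt_eq_N code depth h1 hne hk']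
      rw [nbKeypresses]
      exact (nbGo_spec depth.toNat PySem.Dict.empty code.toList depth
        (fun k v h => by rw [PySem.Dict.get?_empty] at h; cases h) (by omega) (by omega)).1
    · have hd : ¬ depth = 0 := by omega
      rw [nbKeypresses_alt, if_neg hd, if_pos (by decide)]
      rw [nbKeypresses]
      exact nbGo_nil depth.toNat depth hd
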